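-- pv_equiv track=rewrite | github.com/Derek00101/IPC2_Proyecto1_202300392 | utils/procesador.py | agrupar_estaciones
-- ===== SOURCE A (Python) =====
-- def agrupar_estaciones(estaciones, patrones, matriz):
--     """
--     Agrupa estaciones con el mismo patrón.
--     Retorna estaciones agrupadas y la matriz reducida.
--     """
--     grupos = {}
--
--     for i, patron in enumerate(patrones):
--         if patron not in grupos:
--             grupos[patron] = {"estaciones": [], "valores": [0]*len(matriz[0])}
--         grupos[patron]["estaciones"].append(estaciones[i])
--
--         # Sumar frecuencias de esta estación al grupo
--         for j, val in enumerate(matriz[i]):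
--             grupos[patron]["valores"][j] += val
--
--     # Construir resultados
--     nuevas_estaciones = []
--     nueva_matriz = []
--     for datos in grupos.values():
--         nombre = ", ".join(datos["estaciones"])
--         nuevas_estaciones.append(nombre)
--         nueva_matriz.append(datos["valores"])
--
--     return nuevas_estaciones, nueva_matriz
-- ===== SOURCE B (Python) =====
-- def agrupar_estaciones(estaciones, patrones, matriz):
--     # Pass 1: group row indices by pattern (dict keeps first-seen order).
--     grupos = {}
--     for i, p in enumerate(patrones):
--         grupos.setdefault(p, []).append(i)
--     ancho = len(matriz[0]) if matriz else 0
--     # Pass 2: join names per group; reduced row = column-wise sums over the group.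
--     nombres = [", ".join(estaciones[i] for i in idxs) for idxs in grupos.values()]
--     filas = [[sum(matriz[i][j] for i in idxs) for j in range(ancho)]
--              for idxs in grupos.values()]
--     return nombres, filas
-- ===== Notes on version B (the rewrite author's own statement) =====
-- stated objective: alternative
-- what changed: B splits A's single mutating pass into two passes: a dict grouping each pattern to its row indices, then per group a ', '-join of names and a column-wise sum comprehension, instead of A's per-row in-place accumulator updates; Pre_ excludes ragged matrices whose used rows are shorter than row 0, where A's zero-padding is an accident of its preallocated accumulator and B's index-based column sums raise IndexError.
-- outside the precondition, e.g. on agrupar_estaciones(['a', 'b'], ['x', 'x'], [[1, 2], [3]]): A returns (['a, b'], [[4, 2]]), B raises IndexError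
import Mathlib
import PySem

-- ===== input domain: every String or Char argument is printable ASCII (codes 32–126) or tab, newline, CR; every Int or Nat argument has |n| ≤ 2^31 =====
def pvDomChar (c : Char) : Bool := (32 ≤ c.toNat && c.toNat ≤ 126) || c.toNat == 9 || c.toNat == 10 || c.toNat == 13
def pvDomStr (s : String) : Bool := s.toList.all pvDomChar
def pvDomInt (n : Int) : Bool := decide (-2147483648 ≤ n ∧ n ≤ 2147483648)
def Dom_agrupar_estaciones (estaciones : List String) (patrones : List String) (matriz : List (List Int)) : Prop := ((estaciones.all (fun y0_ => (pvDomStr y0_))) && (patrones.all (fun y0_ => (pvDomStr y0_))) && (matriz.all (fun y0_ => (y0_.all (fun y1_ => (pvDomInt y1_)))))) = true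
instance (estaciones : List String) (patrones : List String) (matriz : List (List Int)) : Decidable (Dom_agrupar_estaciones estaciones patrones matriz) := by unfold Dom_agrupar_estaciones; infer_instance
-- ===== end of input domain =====

-- B regroups in two passes (indices per pattern, then column-wise sums) instead of A's
-- single pass mutating per-group accumulators; objective: alternative decomposition, same cost.

-- ===== PORT A =====
-- loop body of A's 'for i, patron in enumerate(patrones)' (dict value = ("estaciones", "valores"))
def pvAstep (estaciones : List String) (matriz : List (List Int))
    (g : PySem.Dict String (List String × List Int)) (ip : Int × String) :
    PySem.Dict String (List String × List Int) :=
  let i := ip.1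
  let patron := ip.2
  -- if patron not in grupos: grupos[patron] = {"estaciones": [], "valores": [0]*len(matriz[0])}
  let g := if g.contains patron then g
           else g.insert patron ([], List.replicate (matriz.headD []).length (0 : Int))
  let datos := g.getD patron ([], [])
  -- grupos[patron]["estaciones"].append(estaciones[i])
  let nombres := datos.1 ++ [PySem.List.pyGetD estaciones i ""]
  -- for j, val in enumerate(matriz[i]): grupos[patron]["valores"][j] += val
  let valores := ((PySem.List.pyGetD matriz i []).foldl
      (fun (st : List Int × Nat) val => (st.1.set st.2 (st.1.getD st.2 0 + val), st.2 + 1))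
      (datos.2, 0)).1
  g.insert patron (nombres, valores)

def agrupar_estaciones (estaciones : List String) (patrones : List String)
    (matriz : List (List Int)) : List String × List (List Int) :=
  let grupos := (PySem.List.enumerate patrones).foldl (pvAstep estaciones matriz)
      (PySem.Dict.empty : PySem.Dict String (List String × List Int))
  -- for datos in grupos.values(): append ", ".join(...) and the row
  grupos.values.foldl
    (fun (res : List String × List (List Int)) datos =>
      (res.1 ++ [PySem.Str.join ", " datos.1], res.2 ++ [datos.2])) ([], [])

-- ===== PORT B =====
-- grupos.setdefault(p, []).append(i)  (get-or-default, append, store back)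
def pvBstep (g : PySem.Dict String (List Int)) (ip : Int × String) : PySem.Dict String (List Int) :=
  g.insert ip.2 (g.getD ip.2 [] ++ [ip.1])

-- matriz[i][j] is in range on every input admitted by Pre_ (used rows have width len(matriz[0]));
-- pyGetD is exact there (B's Python raises outside Pre_, which Pre_ excludes).
def agrupar_estaciones_alt (estaciones : List String) (patrones : List String)
    (matriz : List (List Int)) : List String × List (List Int) :=
  let grupos := (PySem.List.enumerate patrones).foldl pvBstep
      (PySem.Dict.empty : PySem.Dict String (List Int))
  let ancho : Nat := if matriz ≠ [] then (matriz.headD []).length else 0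
  let nombres := grupos.values.map (fun idxs =>
      PySem.Str.join ", " (idxs.map (fun i => PySem.List.pyGetD estaciones i "")))
  let filas := grupos.values.map (fun idxs =>
      (PySem.List.pyRange 0 (ancho : Int) 1).map (fun j =>
        (idxs.map (fun i => PySem.List.pyGetD (PySem.List.pyGetD matriz i []) j 0)).sum))
  (nombres, filas)

-- ===== PRECONDITION & SPEC =====
-- Pre_ excludes (a) inputs where A itself raises (missing estaciones[i]/matriz[i]/matriz[0], or a
-- used row longer than row 0), and (b) ragged matrices whose used rows are SHORTER than row 0:
-- there A's zero-padding of the missing columns is an accident of its preallocated accumulator,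
-- and B's natural column sums raise IndexError.  So: every used row has exactly row 0's width.
def Pre_agrupar_estaciones (estaciones : List String) (patrones : List String) (matriz : List (List Int)) : Prop :=
  patrones.length ≤ estaciones.length ∧ patrones.length ≤ matriz.length ∧
  (patrones = [] ∨ matriz ≠ []) ∧
  ∀ r ∈ matriz.take patrones.length, r.length = (matriz.headD []).length
instance (estaciones : List String) (patrones : List String) (matriz : List (List Int)) : Decidable (Pre_agrupar_estaciones estaciones patrones matriz) := by unfold Pre_agrupar_estaciones; infer_instance

def pvWitness_agrupar_estaciones : List String × List String × List (List Int) :=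
  (["a", "b", "c"], ["x", "y", "x"], [[1, 2], [3, 4], [5, 6]])

def Spec_agrupar_estaciones (estaciones : List String) (patrones : List String) (matriz : List (List Int)) (out : List String × List (List Int)) : Prop := out = agrupar_estaciones_alt estaciones patrones matriz
instance (estaciones : List String) (patrones : List String) (matriz : List (List Int)) (out : List String × List (List Int)) : Decidable (Spec_agrupar_estaciones estaciones patrones matriz out) := by unfold Spec_agrupar_estaciones; infer_instance

-- ===== CLAIM (what is proved, stated in full; the proofs are below) =====
def Claim_equal_agrupar_estaciones : Prop := ∀ (estaciones : List String) (patrones : List String) (matriz : List (List Int)), Dom_agrupar_estaciones estaciones patrones matriz → Pre_agrupar_estaciones estaciones patrones matriz → Spec_agrupar_estaciones estaciones patrones matriz (agrupar_estaciones estaciones patrones matriz)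

-- ===== LEMMAS AND PROOFS =====

-- elementwise addition of a (shorter or equal) row into an accumulator, keeping the accumulator's length
def pvAddTo : List Int → List Int → List Int
  | a, [] => a
  | [], _ :: _ => []
  | x :: a, v :: r => (x + v) :: pvAddTo a r

-- the per-group reduced row: sum of the group's rows, padded to width w
def pvSumRows (matriz : List (List Int)) (w : Nat) (idxs : List Int) : List Int :=
  idxs.foldl (fun acc i => pvAddTo acc (PySem.List.pyGetD matriz i [])) (List.replicate w 0)

def pvNames (estaciones : List String) (idxs : List Int) : List String :=
  idxs.map (fun i => PySem.List.pyGetD estaciones i "")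

lemma pvAddTo_nil (a : List Int) : pvAddTo a [] = a := by cases a <;> rfl

lemma length_pvAddTo (a r : List Int) : (pvAddTo a r).length = a.length := by
  induction a generalizing r with
  | nil => cases r <;> rfl
  | cons x a ih => cases r with
    | nil => rfl
    | cons v r => simp [pvAddTo, ih]

lemma getD_pvAddTo (a r : List Int) (h : r.length ≤ a.length) (j : Nat) :
    (pvAddTo a r).getD j 0 = a.getD j 0 + r.getD j 0 := by
  induction a generalizing r j with
  | nil =>
    cases r with
    | nil => simp [pvAddTo]
    | cons v r => simp at h
  | cons x a ih =>
    cases r with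
    | nil => simp [pvAddTo]
    | cons v r =>
      cases j with
      | zero => simp [pvAddTo]
      | succ j => simpa [pvAddTo] using ih r (by simpa using h) j

lemma pvInnerFold (r : List Int) : ∀ (acc : List Int) (k : Nat), k + r.length ≤ acc.length →
    (r.foldl (fun (st : List Int × Nat) val => (st.1.set st.2 (st.1.getD st.2 0 + val), st.2 + 1)) (acc, k)).1
      = acc.take k ++ pvAddTo (acc.drop k) r := by
  induction r with
  | nil => intro acc k h; simp [pvAddTo_nil]
  | cons v r ih =>
    intro acc k h
    have hk : k < acc.length := by simp at h; omega
    have hset : acc.set k (acc.getD k 0 + v) = acc.take k ++ (acc.getD k 0 + v) :: acc.drop (k + 1) := by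
      rw [List.set_eq_take_append_cons_drop]; simp [hk]
    have hlen : (acc.set k (acc.getD k 0 + v)).length = acc.length := by simp
    rw [List.foldl_cons]
    have := ih (acc.set k (acc.getD k 0 + v)) (k + 1) (by simp at h ⊢; omega)
    simp only at this
    rw [this]
    have hdrop : acc.drop k = acc[k] :: acc.drop (k + 1) := List.drop_eq_getElem_cons hk
    have hgetD : acc.getD k 0 = acc[k] := by simp [List.getD, List.getElem?_eq_getElem hk]
    rw [hset]
    have hlt : (acc.take k).length = k := by simp; omega
    rw [List.take_append, List.drop_append, hlt]
    have h1 : k + 1 - k = 1 := by omega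
    rw [h1, List.take_take, List.drop_eq_nil_of_le (by omega : (List.take k acc).length ≤ k + 1),
      hdrop, hgetD]
    simp [pvAddTo]

-- A's inner loop, started at position 0, adds the row elementwise
lemma pvInnerFold_zero (r acc : List Int) (h : r.length ≤ acc.length) :
    (r.foldl (fun (st : List Int × Nat) val => (st.1.set st.2 (st.1.getD st.2 0 + val), st.2 + 1)) (acc, 0)).1
      = pvAddTo acc r := by
  simpa using pvInnerFold r acc 0 (by omega)

lemma length_pvSumRows (matriz : List (List Int)) (w : Nat) (idxs : List Int) :
    (pvSumRows matriz w idxs).length = w := by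
  suffices h : ∀ (l : List Int) (acc : List Int),
      (l.foldl (fun acc i => pvAddTo acc (PySem.List.pyGetD matriz i [])) acc).length = acc.length by
    simpa using h idxs (List.replicate w 0)
  intro l
  induction l with
  | nil => simp
  | cons i l ih => intro acc; simp [ih, length_pvAddTo]

lemma getD_foldl_pvAddTo (matriz : List (List Int)) (idxs : List Int) (j : Nat) :
    ∀ (acc : List Int), (∀ i ∈ idxs, (PySem.List.pyGetD matriz i []).length ≤ acc.length) →
    (idxs.foldl (fun acc i => pvAddTo acc (PySem.List.pyGetD matriz i [])) acc).getD j 0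
      = acc.getD j 0 + (idxs.map (fun i => (PySem.List.pyGetD matriz i []).getD j 0)).sum := by
  induction idxs with
  | nil => simp
  | cons i idxs ih =>
    intro acc h
    have h1 : (PySem.List.pyGetD matriz i []).length ≤ acc.length := h i (by simp)
    simp only [List.foldl_cons, List.map_cons, List.sum_cons]
    rw [ih _ (fun i' hi' => by rw [length_pvAddTo]; exact h i' (by simp [hi']))]
    rw [getD_pvAddTo _ _ h1]
    ring

lemma getD_pvSumRows (matriz : List (List Int)) (w : Nat) (idxs : List Int)
    (h : ∀ i ∈ idxs, (PySem.List.pyGetD matriz i []).length ≤ w) (j : Nat) :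
    (pvSumRows matriz w idxs).getD j 0
      = (idxs.map (fun i => (PySem.List.pyGetD matriz i []).getD j 0)).sum := by
  unfold pvSumRows
  rw [getD_foldl_pvAddTo matriz idxs j _ (by simpa using h)]
  have : (List.replicate w (0:Int)).getD j 0 = 0 := by
    simp [List.getD, List.getElem?_replicate]
    split_ifs <;> simp
  rw [this, zero_add]

lemma pvSumRows_append (matriz : List (List Int)) (w : Nat) (idxs : List Int) (i : Int) :
    pvSumRows matriz w (idxs ++ [i]) = pvAddTo (pvSumRows matriz w idxs) (PySem.List.pyGetD matriz i []) := by
  simp [pvSumRows]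

-- B's column-wise comprehension computes the same reduced row as the iterated pvAddTo
lemma pvColSum_eq (matriz : List (List Int)) (w : Nat) (idxs : List Int)
    (h : ∀ i ∈ idxs, (PySem.List.pyGetD matriz i []).length ≤ w) :
    (PySem.List.pyRange 0 (w : Int) 1).map (fun j =>
        (idxs.map (fun i => PySem.List.pyGetD (PySem.List.pyGetD matriz i []) j 0)).sum)
      = pvSumRows matriz w idxs := by
  rw [PySem.List.pyRange_zero_natCast, List.map_map]
  apply List.ext_getElem
  · simp [length_pvSumRows]
  · intro k hk hk'
    have hkw : k < w := by simpa using hk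
    simp only [List.getElem_map, List.getElem_range, Function.comp_apply]
    have : ∀ i : Int, PySem.List.pyGetD (PySem.List.pyGetD matriz i []) ((k : Nat) : Int) 0
        = (PySem.List.pyGetD matriz i []).getD k 0 := by
      intro i; rw [PySem.List.pyGetD_natCast]
    simp only [this]
    rw [← getD_pvSumRows matriz w idxs h k]
    have hklen : k < (pvSumRows matriz w idxs).length := by rw [length_pvSumRows]; exact hkw
    simp [List.getD, List.getElem?_eq_getElem hklen]

-- the joint loop invariant: A's dict is B's dict with each index list replaced by
-- (its station names, its reduced row)
lemma pvDictInvariant (estaciones : List String) (matriz : List (List Int)) (w : Nat)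
    (hw : w = (matriz.headD []).length) (l : List (Int × String))
    (hl : ∀ q ∈ l, (PySem.List.pyGetD matriz q.1 []).length ≤ w) :
    ∀ (gA : PySem.Dict String (List String × List Int)) (gB : PySem.Dict String (List Int)),
    gB.keys.Nodup →
    gA.items = gB.items.map (fun q => (q.1, (pvNames estaciones q.2, pvSumRows matriz w q.2))) →
    (∀ q ∈ gB.items, ∀ i ∈ q.2, (PySem.List.pyGetD matriz i []).length ≤ w) →
    (l.foldl pvBstep gB).keys.Nodup ∧
    (l.foldl (pvAstep estaciones matriz) gA).items
      = (l.foldl pvBstep gB).items.map (fun q => (q.1, (pvNames estaciones q.2, pvSumRows matriz w q.2))) ∧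
    (∀ q ∈ (l.foldl pvBstep gB).items, ∀ i ∈ q.2, (PySem.List.pyGetD matriz i []).length ≤ w) := by
  induction l with
  | nil => intro gA gB hnd hitems hrows; exact ⟨hnd, hitems, hrows⟩
  | cons ip l ih =>
    intro gA gB hnd hitems hrows
    obtain ⟨i, p⟩ := ip
    have hrow : (PySem.List.pyGetD matriz i []).length ≤ w := hl (i, p) (by simp)
    have hl' : ∀ q ∈ l, (PySem.List.pyGetD matriz q.1 []).length ≤ w :=
      fun q hq => hl q (by simp [hq])
    have hkeys : gA.keys = gB.keys := by
      simp only [PySem.Dict.keys, hitems, List.map_map]; rfl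
    have hAnd : gA.keys.Nodup := hkeys ▸ hnd
    have hcont : gA.contains p = gB.contains p := by
      rw [PySem.Dict.contains_eq_decide_mem_keys, PySem.Dict.contains_eq_decide_mem_keys, hkeys]
    simp only [List.foldl_cons]
    by_cases hc : gB.contains p = true
    · -- the pattern is already a key: both sides overwrite its entry in place
      have hcA : gA.contains p = true := hcont.trans hc
      obtain ⟨q, hqmem0, hq1⟩ := List.mem_map.mp ((PySem.Dict.contains_iff_mem_keys gB p).mp hc)
      set idxs := q.2 with hidxs
      have hqmem : (p, idxs) ∈ gB.items := by rwa [show (p, idxs) = q from by rw [hidxs, ← hq1]]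
      have hBget : gB.getD p [] = idxs := PySem.Dict.getD_of_mem_items gB hqmem hnd []
      have hAmem : (p, (pvNames estaciones idxs, pvSumRows matriz w idxs)) ∈ gA.items := by
        rw [hitems]; exact List.mem_map_of_mem hqmem
      have hAget : gA.getD p ([], []) = (pvNames estaciones idxs, pvSumRows matriz w idxs) :=
        PySem.Dict.getD_of_mem_items gA hAmem hAnd _
      have hstepA : pvAstep estaciones matriz gA (i, p)
          = gA.insert p (pvNames estaciones (idxs ++ [i]), pvSumRows matriz w (idxs ++ [i])) := by
        unfold pvAstep
        simp only [hcA, if_true, hAget]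
        rw [pvInnerFold_zero _ _ (by rw [length_pvSumRows]; exact hrow)]
        rw [← pvSumRows_append]
        simp [pvNames]
      have hstepB : pvBstep gB (i, p) = gB.insert p (idxs ++ [i]) := by
        unfold pvBstep; rw [hBget]
      rw [hstepA, hstepB]
      refine ih hl' _ _ (PySem.Dict.nodup_keys_insert gB p _ hnd) ?_ ?_
      · rw [PySem.Dict.items_insert_of_contains gA _ hcA,
          PySem.Dict.items_insert_of_contains gB _ hc, hitems, List.map_map, List.map_map]
        apply List.map_congr_left
        intro q hq
        by_cases hqp : q.1 = p <;> simp [hqp]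
      · intro q hq i' hi'
        rw [PySem.Dict.mem_items_insert] at hq
        rcases hq with hq | ⟨hq, _⟩
        · subst hq
          rcases List.mem_append.mp hi' with h' | h'
          · exact hrows _ hqmem _ h'
          · simp at h'; subst h'; exact hrow
        · exact hrows _ hq _ hi'
    · -- a fresh pattern: both sides append a new entry
      have hcA : gA.contains p = false := by rw [hcont]; simpa using hc
      have hstepA : pvAstep estaciones matriz gA (i, p)
          = gA.insert p (pvNames estaciones [i], pvSumRows matriz w [i]) := by
        unfold pvAstep
        simp only [hcA, if_false, Bool.false_eq_true]
        rw [PySem.Dict.getD_insert_self, ← hw]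
        rw [pvInnerFold_zero _ _ (by simpa using hrow)]
        rw [PySem.Dict.insert_insert_self]
        simp [pvNames, pvSumRows]
      have hstepB : pvBstep gB (i, p) = gB.insert p [i] := by
        unfold pvBstep; rw [PySem.Dict.getD_of_not_contains gB [] (by simpa using hc)]; rfl
      rw [hstepA, hstepB]
      refine ih hl' _ _ (PySem.Dict.nodup_keys_insert gB p _ hnd) ?_ ?_
      · rw [PySem.Dict.items_insert_of_not_contains gA _ hcA,
          PySem.Dict.items_insert_of_not_contains gB _ (by simpa using hc), hitems, List.map_append]
        simp
      · intro q hq i' hi'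
        rw [PySem.Dict.mem_items_insert] at hq
        rcases hq with hq | ⟨hq, _⟩
        · subst hq; simp at hi'; subst hi'; exact hrow
        · exact hrows _ hq _ hi'

theorem agrupar_estaciones_spec : Claim_equal_agrupar_estaciones := by
  unfold Claim_equal_agrupar_estaciones
  intro estaciones patrones matriz _hdom hpre
  obtain ⟨hpe, hpm, hnil, hwide⟩ := hpre
  unfold Spec_agrupar_estaciones
  set w : Nat := (matriz.headD []).length with hw
  -- every enumerated row is at most w wide
  have hl : ∀ q ∈ PySem.List.enumerate patrones, (PySem.List.pyGetD matriz q.1 []).length ≤ w := by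
    intro q hq
    rw [PySem.List.mem_enumerate_iff] at hq
    obtain ⟨k, hk, rfl⟩ := hq
    have hkm : k < matriz.length := lt_of_lt_of_le hk hpm
    have : PySem.List.pyGetD matriz ((0 : Int) + (k : Nat)) [] = matriz.getD k [] := by
      rw [zero_add, PySem.List.pyGetD_natCast]
    rw [this, List.getD_eq_getElem _ _ hkm]
    have hkt : k < (matriz.take patrones.length).length := by simp; omega
    have := hwide (matriz.take patrones.length)[k] (List.getElem_mem hkt)
    rw [List.getElem_take] at this
    exact le_of_eq this
  have hinv := pvDictInvariant estaciones matriz w hw (PySem.List.enumerate patrones) hl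
      PySem.Dict.empty PySem.Dict.empty (by simp) (by rfl) (by intro q hq; simp [PySem.Dict.empty] at hq)
  obtain ⟨hnd, hitems, hrows⟩ := hinv
  set gB := (PySem.List.enumerate patrones).foldl pvBstep PySem.Dict.empty with hgB
  unfold agrupar_estaciones agrupar_estaciones_alt
  rw [PySem.List.foldl_prod_mk
      (fun (a : List String) (d : List String × List Int) => a ++ [PySem.Str.join ", " d.1])
      (fun (a : List (List Int)) (d : List String × List Int) => a ++ [d.2])]
  rw [PySem.List.foldl_append_singleton_eq_map
      (fun (d : List String × List Int) => PySem.Str.join ", " d.1),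
    PySem.List.foldl_append_singleton_eq_map (fun (d : List String × List Int) => d.2)]
  have hancho : (if matriz ≠ [] then (matriz.headD []).length else 0) = w := by
    cases matriz <;> simp [hw]
  simp only [PySem.Dict.values, ← hgB, hitems, List.map_map, List.nil_append, hancho]
  simp only [Prod.mk.injEq]
  constructor
  · apply List.map_congr_left; intro q _; simp [pvNames]
  · apply List.map_congr_left
    intro q hq
    have hb : ∀ i ∈ q.2, (PySem.List.pyGetD matriz i []).length ≤ w := hrows q hq
    simpa using (pvColSum_eq matriz w q.2 hb).symm
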